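-- pv_equiv track=rewrite | github.com/redzhepdx/InterviewProblems | google_foobar/redzhep_python/bunny_worker_locations.py | solution
-- ===== SOURCE A (Python) =====
-- def solution(x, y):
--     val = 1
--     last_increment = 2
--
--     for i in range(1, x):
--         val += last_increment
--         last_increment += 1
--
--     last_increment -= 1
--
--     for j in range(1, y):
--         val += last_increment
--         last_increment += 1
--
--     return str(val)
-- ===== SOURCE B (Python) =====
-- def solution(x, y):
--     n1 = x - 1 if x > 1 else 0
--     n2 = y - 1 if y > 1 else 0
--     return str(1 + n1 * (n1 + 3) // 2 + n2 * (2 * n1 + n2 + 1) // 2)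
-- ===== Notes on version B (the rewrite author's own statement) =====
-- stated objective: faster
-- what changed: Replaced the two accumulation loops over ranges by a closed-form arithmetic-series formula evaluated in O(1).
import Mathlib
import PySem

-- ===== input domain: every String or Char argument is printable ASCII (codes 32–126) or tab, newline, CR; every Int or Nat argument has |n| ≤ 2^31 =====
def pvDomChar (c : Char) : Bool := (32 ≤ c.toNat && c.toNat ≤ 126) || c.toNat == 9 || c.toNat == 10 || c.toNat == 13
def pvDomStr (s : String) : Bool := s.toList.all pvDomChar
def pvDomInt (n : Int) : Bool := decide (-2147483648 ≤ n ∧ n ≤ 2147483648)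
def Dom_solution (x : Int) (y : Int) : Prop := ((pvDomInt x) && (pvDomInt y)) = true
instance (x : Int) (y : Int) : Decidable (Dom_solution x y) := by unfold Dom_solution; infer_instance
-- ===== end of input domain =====

-- B replaces A's two accumulation loops by a closed-form arithmetic-series formula (O(1) instead of O(x+y)).

-- ===== PORT A =====
def solution (x : Int) (y : Int) : String :=
  let s1 := (PySem.List.pyRange 1 x 1).foldl (fun (p : Int × Int) _ => (p.1 + p.2, p.2 + 1)) (1, 2)
  let li := s1.2 - 1
  let s2 := (PySem.List.pyRange 1 y 1).foldl (fun (p : Int × Int) _ => (p.1 + p.2, p.2 + 1)) (s1.1, li)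
  PySem.Int.toStr s2.1

-- ===== PORT B =====
def solution_alt (x : Int) (y : Int) : String :=
  let n1 : Int := if x > 1 then x - 1 else 0
  let n2 : Int := if y > 1 then y - 1 else 0
  PySem.Int.toStr (1 + PySem.Int.floordiv (n1 * (n1 + 3)) 2
                     + PySem.Int.floordiv (n2 * (2 * n1 + n2 + 1)) 2)

-- ===== PRECONDITION & SPEC =====
def Spec_solution (x : Int) (y : Int) (out : String) : Prop := out = solution_alt x y
instance (x : Int) (y : Int) (out : String) : Decidable (Spec_solution x y out) := by unfold Spec_solution; infer_instance

-- ===== CLAIM (what is proved, stated in full; the proofs are below) =====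
def Claim_equal_solution : Prop := ∀ (x : Int) (y : Int), Dom_solution x y → Spec_solution x y (solution x y)

-- ===== LEMMAS AND PROOFS =====

/-- The accumulation loop `for _ in l: val += li; li += 1` adds an arithmetic series. -/
theorem pvLoop (l : List Int) : ∀ (val li : Int),
    2 * ((l.foldl (fun (p : Int × Int) _ => (p.1 + p.2, p.2 + 1)) (val, li)).1)
      = 2 * val + 2 * (l.length : Int) * li + (l.length : Int) * ((l.length : Int) - 1)
  ∧ (l.foldl (fun (p : Int × Int) _ => (p.1 + p.2, p.2 + 1)) (val, li)).2 = li + l.length := by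
  induction l with
  | nil => intro val li; simp
  | cons a t ih =>
    intro val li
    simp only [List.foldl_cons, List.length_cons]
    obtain ⟨h1, h2⟩ := ih (val + li) (li + 1)
    refine ⟨?_, ?_⟩
    · rw [h1]; push_cast; ring
    · rw [h2]; push_cast; ring

/-- `n * (n + 2c + 1)` is even, and Python `// 2` halves it exactly. -/
theorem pvEven (n c : Int) :
    2 * PySem.Int.floordiv (n * (n + 2 * c + 1)) 2 = n * (n + 2 * c + 1) := by
  obtain ⟨m, hm⟩ := Int.even_mul_succ_self n
  have h : n * (n + 2 * c + 1) = 2 * (m + n * c) := by linear_combination hm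
  rw [h, PySem.Int.floordiv_eq_ediv_of_pos (by norm_num),
      Int.mul_ediv_cancel_left _ (by norm_num)]

theorem pvMain (x y : Int) : solution x y = solution_alt x y := by
  unfold solution solution_alt
  show PySem.Int.toStr ((PySem.List.pyRange 1 y 1).foldl (fun (p : Int × Int) _ => (p.1 + p.2, p.2 + 1))
      (((PySem.List.pyRange 1 x 1).foldl (fun (p : Int × Int) _ => (p.1 + p.2, p.2 + 1)) (1, 2)).1,
       ((PySem.List.pyRange 1 x 1).foldl (fun (p : Int × Int) _ => (p.1 + p.2, p.2 + 1)) (1, 2)).2 - 1)).1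
    = PySem.Int.toStr (1
        + PySem.Int.floordiv ((if x > 1 then x - 1 else 0) * ((if x > 1 then x - 1 else 0) + 3)) 2
        + PySem.Int.floordiv ((if y > 1 then y - 1 else 0)
            * (2 * (if x > 1 then x - 1 else 0) + (if y > 1 then y - 1 else 0) + 1)) 2)
  apply congrArg
  set n1 : Int := if x > 1 then x - 1 else 0 with hn1
  set n2 : Int := if y > 1 then y - 1 else 0 with hn2
  obtain ⟨h1a, h1b⟩ := pvLoop (PySem.List.pyRange 1 x 1) 1 2
  obtain ⟨h2a, -⟩ := pvLoop (PySem.List.pyRange 1 y 1)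
    ((PySem.List.pyRange 1 x 1).foldl (fun (p : Int × Int) _ => (p.1 + p.2, p.2 + 1)) (1, 2)).1
    (((PySem.List.pyRange 1 x 1).foldl (fun (p : Int × Int) _ => (p.1 + p.2, p.2 + 1)) (1, 2)).2 - 1)
  have hN1 : ((PySem.List.pyRange 1 x 1).length : Int) = n1 := by
    rw [PySem.List.length_pyRange_one, hn1]; split_ifs with h <;> omega
  have hN2 : ((PySem.List.pyRange 1 y 1).length : Int) = n2 := by
    rw [PySem.List.length_pyRange_one, hn2]; split_ifs with h <;> omega
  rw [hN1] at h1a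
  rw [hN1] at h1b
  rw [hN2] at h2a
  have he1 : 2 * PySem.Int.floordiv (n1 * (n1 + 3)) 2 = n1 * (n1 + 3) := by
    have harg : n1 * (n1 + 3) = n1 * (n1 + 2 * 1 + 1) := by ring
    rw [harg]; exact pvEven n1 1
  have he2 : 2 * PySem.Int.floordiv (n2 * (2 * n1 + n2 + 1)) 2 = n2 * (2 * n1 + n2 + 1) := by
    have harg : n2 * (2 * n1 + n2 + 1) = n2 * (n2 + 2 * n1 + 1) := by ring
    rw [harg]; exact pvEven n2 n1
  have hdouble : 2 * ((PySem.List.pyRange 1 y 1).foldl (fun (p : Int × Int) _ => (p.1 + p.2, p.2 + 1))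
      (((PySem.List.pyRange 1 x 1).foldl (fun (p : Int × Int) _ => (p.1 + p.2, p.2 + 1)) (1, 2)).1,
       ((PySem.List.pyRange 1 x 1).foldl (fun (p : Int × Int) _ => (p.1 + p.2, p.2 + 1)) (1, 2)).2 - 1)).1
      = 2 * (1 + PySem.Int.floordiv (n1 * (n1 + 3)) 2 + PySem.Int.floordiv (n2 * (2 * n1 + n2 + 1)) 2) := by
    linear_combination h2a + h1a - he1 - he2 + (2 * n2) * h1b
  linarith [hdouble]

-- ===== VERDICT (by name: the statement is the Claim_ definition above) =====
theorem solution_spec : Claim_equal_solution := by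
  intro x y _
  unfold Spec_solution
  exact pvMain x y
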